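-- pv_equiv track=rewrite | github.com/jatinjaglan18/MapUp-Assessment | submissions/python_section_1.py | rotate_and_multiply_matrix
-- ===== SOURCE A (Python) =====
-- from typing import Dict, List
--
-- def rotate_and_multiply_matrix(matrix: List[List[int]]) -> List[List[int]]:
--     """
--     Rotate the given matrix by 90 degrees clockwise, then multiply each element
--     by the sum of its original row and column index before rotation.
--
--     Args:
--     - matrix (List[List[int]]): 2D list representing the matrix to be transformed.
--
--     Returns:
--     - List[List[int]]: A new 2D list representing the transformed matrix.
--     """
--     # Your code here
--     def rotate_matrix_90_clockwise(matrix):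
--         rotated_matrix = [list(row)[::-1] for row in zip(*matrix)]
--         return rotated_matrix
--
--     def sum_row_col_excluding_self(matrix):
--         n = len(matrix)
--         m = len(matrix[0])
--
--         result = [[0] * m for i in range(n)]
--
--         row_sums = [sum(row) for row in matrix]
--         col_sums = [sum(col) for col in zip(*matrix)]
--
--         # Calculate the sum of row and column excluding the element itself
--         for i in range(n):
--             for j in range(m):
--                 result[i][j] = (row_sums[i] + col_sums[j] - 2 * matrix[i][j])
--
--         return result
--
--     rotated_matrix = rotate_matrix_90_clockwise(matrix)
--     result_matrix = sum_row_col_excluding_self(rotated_matrix)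
--     return result_matrix
-- ===== SOURCE B (Python) =====
-- from typing import List
--
-- def rotate_and_multiply_matrix(matrix: List[List[int]]) -> List[List[int]]:
--     # Compute the result directly from the original matrix without building the
--     # rotated matrix: rotated[i][j] == matrix[n-1-j][i] (rows truncated to the
--     # shortest row length k, as zip(*matrix) does), so
--     # result[i][j] = colsum_orig(i) + trunc_rowsum(n-1-j) - 2*matrix[n-1-j][i].
--     n = len(matrix)
--     k = min(len(row) for row in matrix)
--     col_sums = [sum(row[i] for row in matrix) for i in range(k)]
--     row_sums = [sum(row[:k]) for row in matrix]
--     return [[col_sums[i] + row_sums[n - 1 - j] - 2 * matrix[n - 1 - j][i]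
--              for j in range(n)]
--             for i in range(k)]
-- ===== Notes on version B (the rewrite author's own statement) =====
-- stated objective: alternative
-- what changed: B never builds the rotated matrix or result tables: it derives rotated[i][j] = matrix[n-1-j][i] and emits each output row directly from column sums and truncated row sums of the original matrix.
import Mathlib
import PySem

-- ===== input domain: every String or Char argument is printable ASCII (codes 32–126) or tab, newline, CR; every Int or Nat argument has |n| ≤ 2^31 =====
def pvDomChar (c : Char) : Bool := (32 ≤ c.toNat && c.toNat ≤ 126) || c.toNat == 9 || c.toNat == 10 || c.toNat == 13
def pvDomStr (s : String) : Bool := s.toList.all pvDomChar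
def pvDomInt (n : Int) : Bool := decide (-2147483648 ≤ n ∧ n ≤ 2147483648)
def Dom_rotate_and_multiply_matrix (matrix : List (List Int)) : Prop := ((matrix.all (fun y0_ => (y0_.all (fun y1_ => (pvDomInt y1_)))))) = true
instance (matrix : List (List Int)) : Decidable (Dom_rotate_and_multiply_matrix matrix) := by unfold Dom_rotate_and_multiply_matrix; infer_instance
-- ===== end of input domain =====

-- B computes the transformed matrix directly from the original (rotated[i][j] = matrix[n-1-j][i]),
-- never materialising the rotated matrix: an alternative decomposition of the same O(n·m) task.


-- ===== PORT A =====
-- min of the row lengths (Python's zip(*rows) stops at the shortest row; also B's min())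
def pyMinLen (rows : List (List Int)) : Nat :=
  match rows with
  | [] => 0
  | r :: rs => rs.foldl (fun m x => min m x.length) r.length

-- exact for Python's zip(*rows) (tuples read as lists): column i of rows, for i below every
-- row's length, so the getD default is never used
def pyZipStar (rows : List (List Int)) : List (List Int) :=
  (List.range (pyMinLen rows)).map (fun i => rows.map (fun r => r.getD i 0))

def rotate_and_multiply_matrix (matrix : List (List Int)) : List (List Int) :=
  -- rotate_matrix_90_clockwise: [list(row)[::-1] for row in zip(*matrix)]
  let rotated := (pyZipStar matrix).map List.reverse
  -- sum_row_col_excluding_self(rotated)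
  let n := rotated.length
  let m := (rotated.headD []).length   -- matrix[0]: IndexError when rotated = [] — excluded by Pre_
  let row_sums := rotated.map List.sum
  let col_sums := (pyZipStar rotated).map List.sum
  (List.range n).map (fun i => (List.range m).map (fun j =>
    row_sums.getD i 0 + col_sums.getD j 0 - 2 * (rotated.getD i []).getD j 0))

-- ===== PORT B =====
def rotate_and_multiply_matrix_alt (matrix : List (List Int)) : List (List Int) :=
  let n := matrix.length
  let k := pyMinLen matrix             -- min(): ValueError when matrix = [] — excluded by Pre_
  let col_sums := (List.range k).map (fun i => (matrix.map (fun r => r.getD i 0)).sum)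
  let row_sums := matrix.map (fun r => (r.take k).sum)
  (List.range k).map (fun i => (List.range n).map (fun j =>
    col_sums.getD i 0 + row_sums.getD (n - 1 - j) 0 - 2 * (matrix.getD (n - 1 - j) []).getD i 0))

-- ===== PRECONDITION & SPEC =====
-- Pre_ excludes exactly the inputs where A raises IndexError: the empty matrix and matrices
-- with an empty row (then zip(*matrix) is empty and rotated[0] fails).
def Pre_rotate_and_multiply_matrix (matrix : List (List Int)) : Prop :=
  matrix ≠ [] ∧ ∀ r ∈ matrix, r ≠ []
instance (matrix : List (List Int)) : Decidable (Pre_rotate_and_multiply_matrix matrix) := by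
  unfold Pre_rotate_and_multiply_matrix; infer_instance
def pvWitness_rotate_and_multiply_matrix : List (List Int) := [[1, 2], [3, 4]]

def Spec_rotate_and_multiply_matrix (matrix : List (List Int)) (out : List (List Int)) : Prop :=
  out = rotate_and_multiply_matrix_alt matrix
instance (matrix : List (List Int)) (out : List (List Int)) : Decidable (Spec_rotate_and_multiply_matrix matrix out) := by
  unfold Spec_rotate_and_multiply_matrix; infer_instance

-- ===== CLAIM (what is proved, stated in full; the proofs are below) =====
def Claim_equal_rotate_and_multiply_matrix : Prop := ∀ (matrix : List (List Int)), Dom_rotate_and_multiply_matrix matrix → Pre_rotate_and_multiply_matrix matrix → Spec_rotate_and_multiply_matrix matrix (rotate_and_multiply_matrix matrix)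

-- ===== LEMMAS AND PROOFS =====

theorem foldl_min_le (rs : List (List Int)) (init : Nat) :
    rs.foldl (fun m x => min m x.length) init ≤ init := by
  induction rs generalizing init with
  | nil => simp
  | cons a t ih => exact le_trans (ih _) (min_le_left _ _)

theorem foldl_min_le_mem (rs : List (List Int)) (init : Nat) :
    ∀ x ∈ rs, rs.foldl (fun m y => min m y.length) init ≤ x.length := by
  induction rs generalizing init with
  | nil => intro x hx; cases hx
  | cons a t ih =>
    intro x hx
    simp only [List.foldl_cons]
    rcases List.mem_cons.mp hx with h | h
    · subst h; exact le_trans (foldl_min_le t _) (min_le_right _ _)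
    · exact ih _ x h

theorem pyMinLen_le (rows : List (List Int)) (r : List Int) (hr : r ∈ rows) :
    pyMinLen rows ≤ r.length := by
  match rows with
  | [] => cases hr
  | a :: t =>
    simp only [pyMinLen]
    rcases List.mem_cons.mp hr with h | h
    · subst h; exact foldl_min_le t _
    · exact foldl_min_le_mem t _ r h

theorem foldl_min_pos (rs : List (List Int)) (init : Nat) (h0 : 0 < init)
    (h : ∀ x ∈ rs, x ≠ []) : 0 < rs.foldl (fun m y => min m y.length) init := by
  induction rs generalizing init with
  | nil => simpa
  | cons a t ih =>
    simp only [List.foldl_cons]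
    exact ih _ (lt_min h0 (List.length_pos_of_ne_nil (h a (List.mem_cons_self))))
      (fun x hx => h x (List.mem_cons_of_mem _ hx))

theorem pyMinLen_pos (rows : List (List Int)) (h0 : rows ≠ []) (h : ∀ r ∈ rows, r ≠ []) :
    0 < pyMinLen rows := by
  match rows with
  | [] => exact absurd rfl h0
  | a :: t =>
    simp only [pyMinLen]
    exact foldl_min_pos t _ (List.length_pos_of_ne_nil (h a (List.mem_cons_self)))
      (fun x hx => h x (List.mem_cons_of_mem _ hx))

theorem foldl_min_const (rs : List (List Int)) (n : Nat) (h : ∀ x ∈ rs, x.length = n) :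
    rs.foldl (fun m y => min m y.length) n = n := by
  induction rs with
  | nil => rfl
  | cons a t ih =>
    simp only [List.foldl_cons, h a (List.mem_cons_self), min_self]
    exact ih (fun x hx => h x (List.mem_cons_of_mem _ hx))

theorem pyMinLen_const (rows : List (List Int)) (n : Nat) (h0 : rows ≠ [])
    (h : ∀ r ∈ rows, r.length = n) : pyMinLen rows = n := by
  match rows with
  | [] => exact absurd rfl h0
  | a :: t =>
    simp only [pyMinLen, h a (List.mem_cons_self)]
    exact foldl_min_const t n (fun x hx => h x (List.mem_cons_of_mem _ hx))

theorem getD_map_lt {α β : Type} (l : List α) (f : α → β) (p : Nat) (d : β) (e : α)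
    (h : p < l.length) : (l.map f).getD p d = f (l.getD p e) := by
  rw [List.getD_eq_getElem _ _ (by simpa using h), List.getElem_map, List.getD_eq_getElem _ _ h]

theorem getD_reverse_lt (l : List Int) (j : Nat) (d : Int) (h : j < l.length) :
    l.reverse.getD j d = l.getD (l.length - 1 - j) d := by
  have h' : j < l.reverse.length := by simpa using h
  have h2 : l.length - 1 - j < l.length := by omega
  rw [List.getD_eq_getElem _ _ h', List.getElem_reverse, List.getD_eq_getElem _ _ h2]

theorem take_eq_map_range (l : List Int) (k : Nat) (h : k ≤ l.length) :
    l.take k = (List.range k).map (fun i => l.getD i 0) := by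
  apply List.ext_getElem (by simp [Nat.min_eq_left h])
  intro i h1 h2
  have hi : i < k := by simpa using h2
  rw [List.getElem_take, List.getElem_map, List.getElem_range, List.getD_eq_getElem _ _ (lt_of_lt_of_le hi h)]

-- the common normal form both ports are reduced to
def pvNF (matrix : List (List Int)) : List (List Int) :=
  (List.range (pyMinLen matrix)).map (fun i => (List.range matrix.length).map (fun j =>
    (matrix.map (fun r => r.getD i 0)).sum
    + ((List.range (pyMinLen matrix)).map
        (fun i' => (matrix.getD (matrix.length - 1 - j) []).getD i' 0)).sum
    - 2 * (matrix.getD (matrix.length - 1 - j) []).getD i 0))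

theorem portB_eq_nf (matrix : List (List Int)) :
    rotate_and_multiply_matrix_alt matrix = pvNF matrix := by
  unfold rotate_and_multiply_matrix_alt pvNF
  apply List.map_congr_left
  intro i hi
  have hik : i < pyMinLen matrix := List.mem_range.mp hi
  apply List.map_congr_left
  intro j hj
  have hjn : j < matrix.length := List.mem_range.mp hj
  have hp : matrix.length - 1 - j < matrix.length := by omega
  have hmem : matrix.getD (matrix.length - 1 - j) [] ∈ matrix := by
    rw [List.getD_eq_getElem _ _ hp]; exact List.getElem_mem hp
  rw [PySem.List.getD_map_range _ _ _ _ hik,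
      getD_map_lt matrix _ _ _ [] hp,
      take_eq_map_range _ _ (pyMinLen_le matrix _ hmem)]

theorem portA_eq_nf (matrix : List (List Int)) (hne : matrix ≠ [])
    (hrows : ∀ r ∈ matrix, r ≠ []) :
    rotate_and_multiply_matrix matrix = pvNF matrix := by
  have hk : 0 < pyMinLen matrix := pyMinLen_pos matrix hne hrows
  obtain ⟨k', hk'⟩ : ∃ k', pyMinLen matrix = k' + 1 := ⟨pyMinLen matrix - 1, by omega⟩
  unfold rotate_and_multiply_matrix pvNF
  simp only [pyZipStar, List.map_map]
  -- the rotated matrix is nonempty and its rows have length matrix.length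
  have hrot_min : pyMinLen ((List.range (pyMinLen matrix)).map
      (fun i => (List.map (fun r => r.getD i 0) matrix).reverse)) = matrix.length := by
    apply pyMinLen_const
    · simp [hk']
    · intro r hr
      obtain ⟨i, _, rfl⟩ := List.mem_map.mp hr
      simp
  have hhead : ((List.range (pyMinLen matrix)).map
      (fun i => (List.map (fun r => r.getD i 0) matrix).reverse)).headD [] =
      (List.map (fun r => r.getD 0 0) matrix).reverse := by
    rw [hk', List.range_succ_eq_map, List.map_cons, List.headD_cons]
  simp only [Function.comp_def, hrot_min, hhead, List.length_map, List.length_range,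
    List.length_reverse]
  apply List.map_congr_left
  intro i hi
  have hik : i < pyMinLen matrix := List.mem_range.mp hi
  apply List.map_congr_left
  intro j hj
  have hjn : j < matrix.length := List.mem_range.mp hj
  have hp : matrix.length - 1 - j < matrix.length := by omega
  have hcol_len : ∀ i' : Nat, (List.map (fun r => r.getD i' 0) matrix).length = matrix.length := by
    simp
  rw [PySem.List.getD_map_range _ _ _ _ hik, List.sum_reverse,
      PySem.List.getD_map_range _ _ _ _ hjn,
      PySem.List.getD_map_range _ _ _ _ hik,
      getD_reverse_lt _ _ _ (by simpa using hjn)]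
  simp only [List.length_map]
  rw [getD_map_lt matrix _ _ _ [] hp]
  congr 2
  apply congrArg List.sum
  apply List.map_congr_left
  intro i' hi'
  rw [getD_reverse_lt _ _ _ (by simpa using hjn)]
  simp only [List.length_map]
  rw [getD_map_lt matrix _ _ _ [] hp]

-- ===== VERDICT (by name: the statement is the Claim_ definition above) =====
theorem rotate_and_multiply_matrix_spec : Claim_equal_rotate_and_multiply_matrix := by
  intro matrix _ hpre
  obtain ⟨hne, hrows⟩ := hpre
  show rotate_and_multiply_matrix matrix = rotate_and_multiply_matrix_alt matrix
  rw [portA_eq_nf matrix hne hrows, portB_eq_nf matrix]
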